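-- pv_equiv track=rewrite | github.com/dsb-lab/qlivecell | sort_labels.py | sort_labels
-- ===== SOURCE A (Python) =====
-- def sort_labels(P):
--     Q = [[-1 for item in sublist] for sublist in P]
--     C = [[] for item in range(max([sublist[-1] for sublist in P])+1)]
--     PQ = [-1 for sublist in C]
--     for i, p in enumerate(P):
--         for j, n in enumerate(p):
--             C[n].append([i,j])
--     nmax = 0
--     for i, p in enumerate(P):
--         for j, n in enumerate(p):
--             ids = C[n]
--             if Q[i][j] == -1:
--                 for ij in ids:
--                     Q[ij[0]][ij[1]] = nmax
--                 PQ[n] = nmax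
--                 nmax += 1
--     return Q, PQ
-- ===== SOURCE B (Python) =====
-- def sort_labels(P):
--     size = max([sublist[-1] for sublist in P]) + 1
--     PQ = [-1] * size
--     nmax = 0
--     Q = []
--     for p in P:
--         q = []
--         for n in p:
--             if PQ[n] == -1:
--                 PQ[n] = nmax
--                 nmax += 1
--             q.append(PQ[n])
--         Q.append(q)
--     return Q, PQ
-- ===== Notes on version B (the rewrite author's own statement) =====
-- stated objective: simpler
-- what changed: Replaces A's two-pass scheme (build per-label occurrence lists C, then on each first appearance bulk-write every occurrence into a pre-initialised Q) by a single pass that uses PQ itself as the first-seen table (PQ[n] == -1 means unseen) and emits each output row directly; no C, no dict, no write-ahead.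
import Mathlib
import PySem

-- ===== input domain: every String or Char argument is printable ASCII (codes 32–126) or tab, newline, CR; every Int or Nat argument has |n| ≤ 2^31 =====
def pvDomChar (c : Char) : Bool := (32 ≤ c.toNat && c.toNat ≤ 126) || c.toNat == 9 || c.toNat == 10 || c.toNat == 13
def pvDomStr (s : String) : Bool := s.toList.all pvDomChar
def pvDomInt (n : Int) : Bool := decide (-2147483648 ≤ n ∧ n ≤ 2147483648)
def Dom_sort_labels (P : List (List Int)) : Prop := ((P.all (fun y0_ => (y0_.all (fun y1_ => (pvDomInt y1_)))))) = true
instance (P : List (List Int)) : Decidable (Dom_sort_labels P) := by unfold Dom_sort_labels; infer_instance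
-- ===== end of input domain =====

-- B replaces A's occurrence-list write-ahead pass by a single direct pass with a first-seen dict (simpler decomposition).

-- ===== PORT A =====
-- Python's inner list [i, j] is ported as the pair (i, j); Q[a][b] = v is ported with
-- pyGetD/pySetD (exact under Pre_, where every index A uses is in range and nonnegative).
def sort_labels (P : List (List Int)) : List (List Int) × List Int :=
  -- Q = [[-1 for item in sublist] for sublist in P]
  let Q : List (List Int) := P.map (fun sublist => sublist.map (fun _ => (-1 : Int)))
  -- C = [[] for item in range(max([sublist[-1] for sublist in P])+1)]  (max/[-1] raise outside Pre_)
  let size : Int :=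
    (PySem.List.max? (P.map (fun sublist => PySem.List.pyGetD sublist (-1) 0)) (fun x => x)).getD 0 + 1
  let C : List (List (Int × Int)) := (PySem.List.pyRange 0 size 1).map (fun _ => [])
  -- PQ = [-1 for sublist in C]
  let PQ : List Int := C.map (fun _ => (-1 : Int))
  -- first loop: C[n].append([i,j])
  let C : List (List (Int × Int)) :=
    (PySem.List.enumerate P 0).foldl (fun C ip =>
      (PySem.List.enumerate ip.2 0).foldl (fun C jn =>
        PySem.List.pySetD C jn.2 (PySem.List.pyGetD C jn.2 [] ++ [(ip.1, jn.1)])) C) C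
  -- second loop
  let s :=
    (PySem.List.enumerate P 0).foldl (fun (s : List (List Int) × List Int × Int) ip =>
      (PySem.List.enumerate ip.2 0).foldl (fun (s : List (List Int) × List Int × Int) jn =>
        let ids := PySem.List.pyGetD C jn.2 []
        if PySem.List.pyGetD (PySem.List.pyGetD s.1 ip.1 []) jn.1 0 == -1 then
          let Q' := ids.foldl (fun Q ij =>
            PySem.List.pySetD Q ij.1
              (PySem.List.pySetD (PySem.List.pyGetD Q ij.1 []) ij.2 s.2.2)) s.1
          (Q', PySem.List.pySetD s.2.1 jn.2 s.2.2, s.2.2 + 1)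
        else s) s) (Q, PQ, 0)
  (s.1, s.2.1)

-- ===== PORT B =====
-- loop bodies of B, named: one row element (the `for n in p` body) and one row (the `for p in P` body);
-- PQ[n] is read/written with pyGetD/pySetD (Python wrap semantics; exact under Pre_, where -size ≤ n < size)
def sortLabelsAltStep (t : List Int × Int × List Int) (n : Int) : List Int × Int × List Int :=
  if PySem.List.pyGetD t.1 n 0 == -1 then
    (PySem.List.pySetD t.1 n t.2.1, t.2.1 + 1,
     t.2.2 ++ [PySem.List.pyGetD (PySem.List.pySetD t.1 n t.2.1) n 0])
  else
    (t.1, t.2.1, t.2.2 ++ [PySem.List.pyGetD t.1 n 0])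

def sortLabelsAltRow (s : List Int × Int × List (List Int)) (p : List Int) :
    List Int × Int × List (List Int)  :=
  let t := p.foldl sortLabelsAltStep (s.1, s.2.1, ([] : List Int))
  (t.1, t.2.1, s.2.2 ++ [t.2.2])

def sort_labels_alt (P : List (List Int)) : List (List Int) × List Int :=
  -- size = max([sublist[-1] for sublist in P]) + 1
  let size : Int :=
    (PySem.List.max? (P.map (fun sublist => PySem.List.pyGetD sublist (-1) 0)) (fun x => x)).getD 0 + 1
  -- PQ = [-1] * size
  let PQ : List Int := List.replicate size.toNat (-1 : Int)
  -- one pass: state (PQ, nmax, Q); PQ doubles as the first-seen table (PQ[n] == -1 ⟺ unseen)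
  let s := P.foldl sortLabelsAltRow (PQ, 0, [])
  (s.2.2, s.1)

-- ===== PRECONDITION & SPEC =====
def pvMaxLast (P : List (List Int)) : Int :=
  (PySem.List.max? (P.map (fun sublist => PySem.List.pyGetD sublist (-1) 0)) (fun x => x)).getD 0

-- Pre_ is exactly the set of inputs on which A returns normally: a nonempty list of nonempty rows
-- whose labels all lie in [-size, size) for size = max of the rows' last entries + 1.  Outside it A
-- raises (ValueError on an empty list, IndexError on an empty row or on a label outside [-size, size)).
def Pre_sort_labels (P : List (List Int)) : Prop :=
  P ≠ [] ∧ ∀ p ∈ P, p ≠ [] ∧ ∀ n ∈ p, -(pvMaxLast P + 1) ≤ n ∧ n < pvMaxLast P + 1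
instance (P : List (List Int)) : Decidable (Pre_sort_labels P) := by
  unfold Pre_sort_labels; infer_instance

def pvWitness_sort_labels : List (List Int) := [[2, 0, 2], [0, 1, 2]]

def Spec_sort_labels (P : List (List Int)) (out : List (List Int) × List Int) : Prop := out = sort_labels_alt P
instance (P : List (List Int)) (out : List (List Int) × List Int) : Decidable (Spec_sort_labels P out) := by unfold Spec_sort_labels; infer_instance

-- ===== CLAIM (what is proved, stated in full; the proofs are below) =====
def Claim_equal_sort_labels : Prop := ∀ (P : List (List Int)), Dom_sort_labels P → Pre_sort_labels P → Spec_sort_labels P (sort_labels P)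


-- ===== LEMMAS AND PROOFS =====

-- `pvD S` is the list of distinct slots of S in first-appearance order; `pvVal S s` is the
-- rank (first-appearance index) of slot s in S, or -1 if s has not appeared.  A label n occupies
-- slot `pvSlot P n` (Python's negative list indices wrap by + size).
def pvD (S : List Int) : List Int := PySem.Set.ofList S
def pvVal (S : List Int) (n : Int) : Int := if n ∈ pvD S then ((pvD S).idxOf n : Int) else -1
def pvSize (P : List (List Int)) : Int := pvMaxLast P + 1
def pvSlot (P : List (List Int)) (n : Int) : Int := if n < 0 then n + pvSize P else n
def pvQA (P : List (List Int)) (S : List Int) : List (List Int) :=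
  P.map (fun p => p.map (fun n => pvVal S (pvSlot P n)))
def pvPQA (P : List (List Int)) (S : List Int) : List Int :=
  (List.range (pvSize P).toNat).map (fun (m : Nat) => pvVal S (m : Int))
-- the flattened write list of A's loops: ((i, j), P[i][j]) in row-major order
def pvFW (P : List (List Int)) : List ((Int × Int) × Int) :=
  (PySem.List.enumerate P 0).flatMap (fun ip =>
    (PySem.List.enumerate ip.2 0).map (fun jn => ((ip.1, jn.1), jn.2)))
def pvOcc (P : List (List Int)) (s : Int) : List (Int × Int) :=
  ((pvFW P).filter (fun w => pvSlot P w.2 == s)).map (fun w => w.1)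
def pvHB (P : List (List Int)) : Prop := ∀ p ∈ P, ∀ n ∈ p, -(pvSize P) ≤ n ∧ n < pvSize P

-- Python wrap semantics of xs[i] / xs[i] = v for -len ≤ i < len
lemma pvGetWrap {α : Type} (xs : List α) (n : Int) (d : α)
    (h0 : -(xs.length : Int) ≤ n) (h1 : n < (xs.length : Int)) :
    PySem.List.pyGetD xs n d = xs.getD (if n < 0 then n + xs.length else n).toNat d := by
  by_cases hn : 0 ≤ n
  · rw [PySem.List.pyGetD_eq_getElem _ _ hn h1, List.getD_eq_getElem _ _ (by omega)]
    congr 1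
    omega
  · have hk : n = -(((-n).toNat : Nat) : Int) := by omega
    rw [hk, PySem.List.pyGetD_neg_natCast _ _ _ (by omega) (by omega),
      List.getD_eq_getElem _ _ (by omega)]
    congr 1
    omega

lemma pvSetWrap {α : Type} (xs : List α) (n : Int) (v : α)
    (h0 : -(xs.length : Int) ≤ n) (h1 : n < (xs.length : Int)) :
    PySem.List.pySetD xs n v = xs.set (if n < 0 then n + xs.length else n).toNat v := by
  simp only [PySem.List.pySetD, PySem.List.pySet?, PySem.List.pyIdx?]
  by_cases hn : 0 ≤ n
  · rw [if_pos hn, if_pos h1]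
    simp only [Option.map_some, Option.getD_some]
    congr 1
    omega
  · rw [if_neg hn, if_pos h0]
    simp only [Option.map_some, Option.getD_some]
    congr 1
    omega

lemma pvSlot_bounds (P : List (List Int)) (n : Int)
    (h0 : -(pvSize P) ≤ n) (h1 : n < pvSize P) :
    0 ≤ pvSlot P n ∧ pvSlot P n < pvSize P := by
  unfold pvSlot
  split_ifs <;> omega

lemma pvD_mem (S : List Int) (n : Int) : n ∈ pvD S ↔ n ∈ S := PySem.Set.mem_ofList S n

lemma pvD_snoc (S : List Int) (n : Int) :
    pvD (S ++ [n]) = if n ∈ S then pvD S else pvD S ++ [n] := by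
  simp only [pvD, PySem.Set.ofList_eq_foldl, List.foldl_append, List.foldl_cons, List.foldl_nil]
  rw [← PySem.Set.ofList_eq_foldl]
  simp only [PySem.Set.add, PySem.Set.contains]
  by_cases h : n ∈ S
  · simp [h, (PySem.Set.mem_ofList S n).2 h]
  · simp [h]

lemma pvD_snoc_mem {S : List Int} {n : Int} (h : n ∈ S) : pvD (S ++ [n]) = pvD S := by
  simp [pvD_snoc, h]

lemma pvD_append (S T : List Int) : ∃ t, pvD (S ++ T) = pvD S ++ t := by
  induction T generalizing S with
  | nil => exact ⟨[], by simp⟩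
  | cons x T ih =>
    rw [show S ++ x :: T = (S ++ [x]) ++ T by simp]
    obtain ⟨t, ht⟩ := ih (S ++ [x])
    rw [ht, pvD_snoc]
    by_cases hx : x ∈ S
    · exact ⟨t, by simp [hx]⟩
    · exact ⟨[x] ++ t, by simp [hx]⟩

lemma pvVal_congr {S T : List Int} (h : pvD S = pvD T) : pvVal S = pvVal T := by
  funext n; simp [pvVal, h]

lemma pvVal_mono (S T : List Int) (n : Int) (h : n ∈ S) : pvVal (S ++ T) n = pvVal S n := by
  obtain ⟨t, ht⟩ := pvD_append S T
  have hm : n ∈ pvD S := (pvD_mem S n).2 h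
  simp [pvVal, ht, List.mem_append, hm, List.idxOf_append_of_mem hm]

lemma pvVal_self (S : List Int) (n : Int) (h : n ∉ S) :
    pvVal (S ++ [n]) n = ((pvD S).length : Int) := by
  have h' : n ∉ pvD S := fun hc => h ((pvD_mem S n).1 hc)
  have hD : pvD (S ++ [n]) = pvD S ++ [n] := by rw [pvD_snoc, if_neg h]
  simp [pvVal, hD, List.idxOf_append, h']

lemma pvVal_ne (S : List Int) (n m : Int) (h : m ≠ n) : pvVal (S ++ [n]) m = pvVal S m := by
  by_cases hn : n ∈ S
  · exact congrFun (pvVal_congr (pvD_snoc_mem hn)) m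
  · have hD : pvD (S ++ [n]) = pvD S ++ [n] := by rw [pvD_snoc, if_neg hn]
    by_cases hm : m ∈ pvD S
    · simp [pvVal, hD, List.mem_append, hm, List.idxOf_append_of_mem hm]
    · have hubb : m ∉ pvD S ++ [n] := by
        simp only [List.mem_append, List.mem_singleton]
        rintro (hc | hc); exact hm hc; exact h hc
      simp [pvVal, hD, hubb, hm]

lemma pvVal_eq_neg_one_iff (S : List Int) (n : Int) : pvVal S n = -1 ↔ n ∉ S := by
  constructor
  · intro hv hm
    have hmD := (pvD_mem S n).2 hm
    rw [pvVal, if_pos hmD] at hv; omega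
  · intro hm; rw [pvVal, if_neg (fun hc => hm ((pvD_mem S n).1 hc))]

lemma pvLen_snoc_not_mem {S : List Int} {n : Int} (h : n ∉ S) :
    ((pvD (S ++ [n])).length : Int) = ((pvD S).length : Int) + 1 := by
  have hD : pvD (S ++ [n]) = pvD S ++ [n] := by rw [pvD_snoc, if_neg h]
  simp [hD]

lemma pvQA_congr (P : List (List Int)) {S T : List Int} (h : pvD S = pvD T) :
    pvQA P S = pvQA P T := by
  simp [pvQA, pvVal_congr h]

lemma pvPQA_congr (P : List (List Int)) {S T : List Int} (h : pvD S = pvD T) :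
    pvPQA P S = pvPQA P T := by
  simp [pvPQA, pvVal_congr h]

lemma pvQA_nil (P : List (List Int)) : pvQA P [] = P.map (fun p => p.map (fun _ => (-1 : Int))) := by
  simp [pvQA, pvVal, pvD, PySem.Set.ofList]

lemma pvPQA_nil (P : List (List Int)) :
    pvPQA P [] = List.replicate (pvSize P).toNat (-1 : Int) := by
  simp [pvPQA, pvVal, pvD, PySem.Set.ofList, List.map_const']

lemma pvPQA_set (P : List (List Int)) (S : List Int) (n : Int)
    (h0 : -(pvSize P) ≤ n) (h1 : n < pvSize P) (h2 : pvSlot P n ∉ S) :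
    PySem.List.pySetD (pvPQA P S) n ((pvD S).length : Int) = pvPQA P (S ++ [pvSlot P n]) := by
  have hM : (1 : Int) ≤ pvSize P := by omega
  have hlen : (pvPQA P S).length = (pvSize P).toNat := by simp [pvPQA]
  obtain ⟨hs0, hs1⟩ := pvSlot_bounds P n h0 h1
  rw [pvSetWrap _ _ _ (by rw [hlen]; omega) (by rw [hlen]; omega)]
  have hidx : (if n < 0 then n + ((pvPQA P S).length : Int) else n).toNat = (pvSlot P n).toNat := by
    rw [hlen]
    unfold pvSlot
    split_ifs <;> omega
  rw [hidx]
  apply List.ext_getElem (by simp [pvPQA])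
  intro m hm1 hm2
  have hmlt : m < (pvSize P).toNat := by simpa [pvPQA] using hm2
  rw [List.getElem_set]
  have hAm : (pvPQA P (S ++ [pvSlot P n]))[m]'hm2 = pvVal (S ++ [pvSlot P n]) (m : Int) := by
    unfold pvPQA; rw [List.getElem_map, List.getElem_range]
  rw [hAm]
  by_cases he : (pvSlot P n).toNat = m
  · have hcast : (m : Int) = pvSlot P n := by omega
    rw [if_pos he, hcast, pvVal_self S (pvSlot P n) h2]
  · have hBm : (pvPQA P S)[m]'(by simpa [pvPQA] using hmlt) = pvVal S (m : Int) := by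
      unfold pvPQA; rw [List.getElem_map, List.getElem_range]
    rw [if_neg he, hBm, pvVal_ne S (pvSlot P n) _ (by omega : (m : Int) ≠ pvSlot P n)]

lemma pvFW_mem {P : List (List Int)} {w : (Int × Int) × Int} (h : w ∈ pvFW P) :
    ∃ (a b : Nat) (ha : a < P.length) (hb : b < P[a].length),
      w = (((a : Int), (b : Int)), P[a][b]) := by
  simp only [pvFW, List.mem_flatMap] at h
  obtain ⟨ip, hip, hw⟩ := h
  rw [PySem.List.mem_enumerate_iff] at hip
  obtain ⟨a, ha, rfl⟩ := hip
  simp only [List.mem_map] at hw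
  obtain ⟨jn, hjn, rfl⟩ := hw
  rw [PySem.List.mem_enumerate_iff] at hjn
  obtain ⟨b, hb, rfl⟩ := hjn
  exact ⟨a, b, ha, hb, by simp⟩

lemma pvFW_mem_of (P : List (List Int)) (a b : Nat) (ha : a < P.length) (hb : b < P[a].length) :
    (((a : Int), (b : Int)), P[a][b]) ∈ pvFW P := by
  simp only [pvFW, List.mem_flatMap]
  refine ⟨((a : Int), P[a]), ?_, ?_⟩
  · rw [PySem.List.mem_enumerate_iff]; exact ⟨a, ha, by simp⟩
  · simp only [List.mem_map]
    refine ⟨((b : Int), P[a][b]), ?_, rfl⟩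
    rw [PySem.List.mem_enumerate_iff]; exact ⟨b, hb, by simp⟩

lemma pvOcc_mem (P : List (List Int)) (s : Int) (a b : Nat)
    (ha : a < P.length) (hb : b < P[a].length) :
    ((a : Int), (b : Int)) ∈ pvOcc P s ↔ pvSlot P (P[a][b]) = s := by
  constructor
  · intro h
    simp only [pvOcc, List.mem_map, List.mem_filter] at h
    obtain ⟨w, ⟨hwF, hwn⟩, hw1⟩ := h
    obtain ⟨a', b', ha', hb', rfl⟩ := pvFW_mem hwF
    simp only at hw1
    have hab : a' = a ∧ b' = b := by
      have h1 := congrArg Prod.fst hw1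
      have h2 := congrArg Prod.snd hw1
      simp only at h1 h2
      omega
    obtain ⟨rfl, rfl⟩ := hab
    simpa using hwn
  · intro h
    simp only [pvOcc, List.mem_map, List.mem_filter]
    exact ⟨(((a : Int), (b : Int)), P[a][b]), ⟨pvFW_mem_of P a b ha hb, by simpa using h⟩, rfl⟩

lemma pvOcc_valid {P : List (List Int)} {s : Int} {ij : Int × Int} (h : ij ∈ pvOcc P s) :
    ∃ (a b : Nat) (ha : a < P.length) (hb : b < P[a].length),
      ij = ((a : Int), (b : Int)) ∧ pvSlot P (P[a][b]) = s := by
  simp only [pvOcc, List.mem_map, List.mem_filter] at h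
  obtain ⟨w, ⟨hwF, hwn⟩, hw1⟩ := h
  obtain ⟨a, b, ha, hb, rfl⟩ := pvFW_mem hwF
  exact ⟨a, b, ha, hb, hw1.symm, by simpa using hwn⟩

lemma pvFW_labels (P : List (List Int)) : (pvFW P).map (fun w => w.2) = P.flatten := by
  suffices h : ∀ (Q : List (List Int)) (s : Int),
      ((PySem.List.enumerate Q s).flatMap (fun ip =>
        (PySem.List.enumerate ip.2 0).map (fun jn => ((ip.1, jn.1), jn.2)))).map (fun w => w.2)
        = Q.flatten by
    exact h P 0
  intro Q
  induction Q with
  | nil => intro s; simp [PySem.List.enumerate_nil]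
  | cons p Q ih =>
    intro s
    rw [PySem.List.enumerate_cons]
    simp only [List.flatMap_cons, List.map_append, ih, List.flatten_cons]
    congr 1
    rw [List.map_map]
    have : ((fun (w : (Int × Int) × Int) => w.2) ∘ fun (jn : Int × Int) => ((s, jn.1), jn.2))
        = fun (jn : Int × Int) => jn.2 := rfl
    rw [this]
    exact PySem.List.map_snd_enumerate p 0

-- nested enumerate-fold = fold over the flattened write list
lemma pvN1 {s : Type} (P : List (List Int)) (g : s → Int → Int → Int → s) (init : s) :
    (PySem.List.enumerate P 0).foldl (fun st ip =>
        (PySem.List.enumerate ip.2 0).foldl (fun st jn => g st ip.1 jn.1 jn.2) st) init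
      = (pvFW P).foldl (fun st w => g st w.1.1 w.1.2 w.2) init := by
  rw [pvFW, List.foldl_flatMap]
  apply PySem.List.foldl_congr_mem
  intro acc ip _
  rw [List.foldl_map]

-- A's first loop: appending each write into its slot of a table (negative labels wrap)
lemma pvG1 (L : Nat) (W : List ((Int × Int) × Int)) :
    ∀ (T : List (List (Int × Int))), T.length = L →
    (∀ w ∈ W, -(L : Int) ≤ w.2 ∧ w.2 < (L : Int)) →
    W.foldl (fun C w =>
        PySem.List.pySetD C w.2 (PySem.List.pyGetD C w.2 [] ++ [w.1])) T
      = T.mapIdx (fun m row => row ++ ((W.filter (fun w =>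
          (if w.2 < 0 then w.2 + (L : Int) else w.2) == (m : Int))).map (fun w => w.1))) := by
  induction W with
  | nil =>
    intro T hT h
    simp only [List.foldl_nil, List.filter_nil, List.map_nil, List.append_nil]
    apply List.ext_getElem (by simp)
    intro m h1 h2; simp [List.getElem_mapIdx]
  | cons w W' ih =>
    intro T hT h
    obtain ⟨hw0, hwlt⟩ := h w List.mem_cons_self
    simp only [List.foldl_cons]
    have hwlen0 : -((T.length : Int)) ≤ w.2 := by omega
    have hwlen1 : w.2 < (T.length : Int) := by omega
    rw [pvSetWrap _ _ _ hwlen0 hwlen1]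
    have hslt : (if w.2 < 0 then w.2 + (T.length : Int) else w.2).toNat < T.length := by
      split_ifs <;> omega
    rw [ih _ (by simpa using hT) (fun x hx => h x (List.mem_cons_of_mem _ hx))]
    apply List.ext_getElem (by simp)
    intro m hm1 hm2
    have hmT : m < T.length := by simpa using hm2
    rw [List.getElem_mapIdx, List.getElem_mapIdx]
    have hT'm : (T.set (if w.2 < 0 then w.2 + (T.length : Int) else w.2).toNat
          (PySem.List.pyGetD T w.2 [] ++ [w.1]))[m]'(by simpa using hmT) =
        if (if w.2 < 0 then w.2 + (T.length : Int) else w.2).toNat = m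
          then T[m]'hmT ++ [w.1] else T[m]'hmT := by
      rw [List.getElem_set]
      by_cases hc : (if w.2 < 0 then w.2 + (T.length : Int) else w.2).toNat = m
      · rw [if_pos hc, if_pos hc, pvGetWrap _ _ _ hwlen0 hwlen1,
          List.getD_eq_getElem _ _ hslt]
        congr 2
      · rw [if_neg hc, if_neg hc]
    rw [hT'm, List.filter_cons]
    by_cases hc : (if w.2 < 0 then w.2 + (L : Int) else w.2) = (m : Int)
    · have hcn : (if w.2 < 0 then w.2 + (T.length : Int) else w.2).toNat = m := by
        rw [hT]
        split_ifs at hc ⊢ <;> omega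
      rw [if_pos hcn, if_pos (by simpa using hc)]
      simp
    · have hcn : ¬ (if w.2 < 0 then w.2 + (T.length : Int) else w.2).toNat = m := by
        rw [hT]
        split_ifs at hc ⊢ <;> omega
      rw [if_neg hcn, if_neg (by simpa using hc)]

lemma pvC1 (P : List (List Int)) (hb : pvHB P) (hM : 0 ≤ pvMaxLast P) (n : Int)
    (h0 : -(pvSize P) ≤ n) (h1 : n < pvSize P) :
    PySem.List.pyGetD
      ((pvFW P).foldl (fun C w =>
          PySem.List.pySetD C w.2 (PySem.List.pyGetD C w.2 [] ++ [w.1]))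
        ((PySem.List.pyRange 0 (pvSize P) 1).map (fun _ => ([] : List (Int × Int))))) n []
      = pvOcc P (pvSlot P n) := by
  have hsz : (((pvSize P).toNat : Nat) : Int) = pvSize P := by unfold pvSize at *; omega
  have hlen : ((PySem.List.pyRange 0 (pvSize P) 1).map (fun _ => ([] : List (Int × Int)))).length
      = (pvSize P).toNat := by
    simp [PySem.List.length_pyRange_one]
  obtain ⟨hs0, hs1⟩ := pvSlot_bounds P n h0 h1
  rw [pvG1 (pvSize P).toNat (pvFW P) _ hlen (fun w hw => by
    obtain ⟨a, b, ha, hbb, rfl⟩ := pvFW_mem hw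
    have hbnd := hb P[a] (List.getElem_mem ha) P[a][b] (List.getElem_mem hbb)
    rw [hsz]
    exact hbnd)]
  have hL : (List.mapIdx (fun m row => row ++ ((pvFW P).filter (fun w =>
      (if w.2 < 0 then w.2 + (((pvSize P).toNat : Nat) : Int) else w.2) == (m : Int))).map (fun w => w.1))
      ((PySem.List.pyRange 0 (pvSize P) 1).map (fun _ => ([] : List (Int × Int))))).length
      = (pvSize P).toNat := by
    simp [PySem.List.length_pyRange_one]
  rw [pvGetWrap _ _ _ (by rw [hL]; omega) (by rw [hL]; omega), hL]
  have hidx : (if n < 0 then n + (((pvSize P).toNat : Nat) : Int) else n).toNat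
      = (pvSlot P n).toNat := by
    unfold pvSlot
    rw [hsz]
  rw [hidx, List.getD_eq_getElem _ _ (by rw [hL]; omega), List.getElem_mapIdx]
  have hC0 : ((PySem.List.pyRange 0 (pvSize P) 1).map
      (fun _ => ([] : List (Int × Int))))[(pvSlot P n).toNat]'(by rw [hlen]; omega) = [] := by
    simp
  rw [hC0, List.nil_append]
  unfold pvOcc
  congr 1
  apply List.filter_congr
  intro w hw
  have hcast : (((pvSlot P n).toNat : Nat) : Int) = pvSlot P n := by omega
  rw [hcast]
  have hwslot : (if w.2 < 0 then w.2 + (((pvSize P).toNat : Nat) : Int) else w.2) = pvSlot P w.2 := by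
    rw [hsz]
    rfl
  rw [hwslot]

lemma pvW1 (ids : List (Int × Int)) (v : Int) :
    ∀ (Q : List (List Int)),
    (∀ ij ∈ ids, ∃ (a b : Nat), ij = ((a : Int), (b : Int)) ∧
        ∃ (ha : a < Q.length), b < Q[a].length) →
    ids.foldl (fun Q ij =>
        PySem.List.pySetD Q ij.1
          (PySem.List.pySetD (PySem.List.pyGetD Q ij.1 []) ij.2 v)) Q
      = Q.mapIdx (fun a row => row.mapIdx (fun b x =>
          if ((a : Int), (b : Int)) ∈ ids then v else x)) := by
  induction ids with
  | nil =>
    intro Q h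
    simp only [List.foldl_nil, List.not_mem_nil, if_false]
    apply List.ext_getElem?
    intro a
    rw [List.getElem?_mapIdx]
    cases hq : Q[a]? with
    | none => rfl
    | some row =>
      simp only [Option.map_some, Option.some.injEq]
      apply List.ext_getElem?
      intro b
      rw [List.getElem?_mapIdx]
      cases row[b]? <;> rfl
  | cons ij rest ih =>
    intro Q h
    obtain ⟨a0, b0, rfl, ha0, hb0⟩ := h _ List.mem_cons_self
    simp only [List.foldl_cons]
    have hw1 : PySem.List.pySetD Q (a0 : Int)
        (PySem.List.pySetD (PySem.List.pyGetD Q (a0 : Int) []) (b0 : Int) v)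
        = Q.set a0 ((Q[a0]'ha0).set b0 v) := by
      rw [PySem.List.pyGetD_natCast, List.getD_eq_getElem _ _ ha0,
        PySem.List.pySetD_of_nonneg _ _ (by positivity),
        PySem.List.pySetD_of_nonneg _ _ (by positivity)]
      simp
    rw [hw1, ih _ (fun ij' hij' => by
      obtain ⟨a, b, rfl, ha, hb⟩ := h _ (List.mem_cons_of_mem _ hij')
      refine ⟨a, b, rfl, by simpa using ha, ?_⟩
      by_cases hca : a = a0
      · subst hca
        simpa [List.getElem_set] using hb
      · simpa [List.getElem_set_ne (fun hh => hca hh.symm)] using hb)]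
    apply List.ext_getElem?
    intro a
    rw [List.getElem?_mapIdx, List.getElem?_mapIdx, List.getElem?_set]
    by_cases hc : a0 = a
    · subst hc
      rw [if_pos rfl, if_pos ha0, List.getElem?_eq_getElem ha0]
      simp only [Option.map_some, Option.some.injEq]
      apply List.ext_getElem?
      intro b
      rw [List.getElem?_mapIdx, List.getElem?_mapIdx, List.getElem?_set]
      by_cases hcb : b0 = b
      · subst hcb
        rw [if_pos rfl, if_pos hb0, List.getElem?_eq_getElem hb0]
        simp only [Option.map_some, Option.some.injEq]
        rw [if_pos List.mem_cons_self]
        by_cases hr : ((a0 : Int), (b0 : Int)) ∈ rest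
        · rw [if_pos hr]
        · rw [if_neg hr]
      · rw [if_neg hcb]
        have hiff : (((a0 : Int), (b : Int)) ∈ rest) ↔
            (((a0 : Int), (b : Int)) ∈ ((a0 : Int), (b0 : Int)) :: rest) := by
          constructor
          · exact List.mem_cons_of_mem _
          · intro hmem
            rcases List.mem_cons.1 hmem with heq | hr
            · exfalso
              have : (b : Int) = (b0 : Int) := congrArg Prod.snd heq
              exact hcb (by omega)
            · exact hr
        have hfg : (fun x => if ((a0 : Int), (b : Int)) ∈ rest then v else x)
            = (fun x => if ((a0 : Int), (b : Int)) ∈ ((a0 : Int), (b0 : Int)) :: rest then v else x) := by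
          funext x; exact if_congr hiff rfl rfl
        rw [hfg]
    · rw [if_neg hc]
      have hfg : (fun row : List Int => row.mapIdx (fun b x =>
            if ((a : Int), (b : Int)) ∈ rest then v else x))
          = (fun row : List Int => row.mapIdx (fun b x =>
            if ((a : Int), (b : Int)) ∈ ((a0 : Int), (b0 : Int)) :: rest then v else x)) := by
        funext row
        apply List.ext_getElem?
        intro b
        rw [List.getElem?_mapIdx, List.getElem?_mapIdx]
        have hiff : (((a : Int), (b : Int)) ∈ rest) ↔
            (((a : Int), (b : Int)) ∈ ((a0 : Int), (b0 : Int)) :: rest) := by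
          constructor
          · exact List.mem_cons_of_mem _
          · intro hmem
            rcases List.mem_cons.1 hmem with heq | hr
            · exfalso
              have : (a : Int) = (a0 : Int) := congrArg Prod.fst heq
              exact hc (by omega)
            · exact hr
        have : (fun x => if ((a : Int), (b : Int)) ∈ rest then v else x)
            = (fun x => if ((a : Int), (b : Int)) ∈ ((a0 : Int), (b0 : Int)) :: rest then v else x) := by
          funext x; exact if_congr hiff rfl rfl
        rw [this]
      rw [hfg]

lemma pvA3 (P : List (List Int)) (S : List Int) (s : Int) (h2 : s ∉ S) :
    (pvQA P S).mapIdx (fun a row => row.mapIdx (fun b x =>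
        if ((a : Int), (b : Int)) ∈ pvOcc P s then ((pvD S).length : Int) else x))
      = pvQA P (S ++ [s]) := by
  apply List.ext_getElem (by simp [pvQA])
  intro a ha1 ha2
  have haP : a < P.length := by simpa [pvQA] using ha2
  rw [List.getElem_mapIdx]
  have hrow : (pvQA P S)[a]'(by simpa [pvQA] using haP)
      = P[a].map (fun m => pvVal S (pvSlot P m)) := by
    simp [pvQA]
  have hrow' : (pvQA P (S ++ [s]))[a]'ha2
      = P[a].map (fun m => pvVal (S ++ [s]) (pvSlot P m)) := by
    simp [pvQA]
  rw [hrow, hrow']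
  apply List.ext_getElem (by simp)
  intro b hb1 hb2
  have hbP : b < P[a].length := by simpa using hb2
  rw [List.getElem_mapIdx, List.getElem_map, List.getElem_map]
  by_cases hc : pvSlot P (P[a][b]) = s
  · rw [if_pos ((pvOcc_mem P s a b haP hbP).2 hc), hc, pvVal_self S s h2]
  · rw [if_neg (fun hmem => hc ((pvOcc_mem P s a b haP hbP).1 hmem)),
      pvVal_ne S s _ hc]

lemma pvRead (P : List (List Int)) (S : List Int) (a b : Nat)
    (ha : a < P.length) (hb : b < P[a].length) :
    PySem.List.pyGetD (PySem.List.pyGetD (pvQA P S) (a : Int) []) (b : Int) 0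
      = pvVal S (pvSlot P (P[a][b])) := by
  have h1 : PySem.List.pyGetD (pvQA P S) (a : Int) []
      = P[a].map (fun m => pvVal S (pvSlot P m)) := by
    rw [PySem.List.pyGetD_natCast]
    rw [List.getD_eq_getElem _ _ (by simpa [pvQA] using ha)]
    simp [pvQA]
  rw [h1, PySem.List.pyGetD_natCast]
  rw [List.getD_eq_getElem _ _ (by simpa using hb)]
  rw [List.getElem_map]

-- A's second loop
lemma pvA2 (P : List (List Int)) (C : List (List (Int × Int)))
    (hC : ∀ n : Int, -(pvSize P) ≤ n → n < pvSize P →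
      PySem.List.pyGetD C n [] = pvOcc P (pvSlot P n))
    (hb : pvHB P) :
    ∀ (ws : List ((Int × Int) × Int)) (S : List Int), (∀ w ∈ ws, w ∈ pvFW P) →
    ws.foldl (fun (st : List (List Int) × List Int × Int) w =>
        if PySem.List.pyGetD (PySem.List.pyGetD st.1 w.1.1 []) w.1.2 0 == -1 then
          ((PySem.List.pyGetD C w.2 []).foldl (fun Q ij =>
              PySem.List.pySetD Q ij.1
                (PySem.List.pySetD (PySem.List.pyGetD Q ij.1 []) ij.2 st.2.2)) st.1,
           PySem.List.pySetD st.2.1 w.2 st.2.2, st.2.2 + 1)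
        else st)
      (pvQA P S, pvPQA P S, ((pvD S).length : Int))
      = (pvQA P (S ++ ws.map (fun w => pvSlot P w.2)),
         pvPQA P (S ++ ws.map (fun w => pvSlot P w.2)),
         ((pvD (S ++ ws.map (fun w => pvSlot P w.2))).length : Int)) := by
  intro ws
  induction ws with
  | nil => intro S hws; simp
  | cons w ws ih =>
    intro S hws
    obtain ⟨a, b, ha, hbb, rfl⟩ := pvFW_mem (hws _ List.mem_cons_self)
    have hbnd := hb P[a] (List.getElem_mem ha) P[a][b] (List.getElem_mem hbb)
    simp only [List.foldl_cons]
    rw [pvRead P S a b ha hbb]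
    by_cases hmem : pvSlot P (P[a][b]) ∈ S
    · rw [if_neg (by
        simp only [beq_iff_eq]
        rw [pvVal_eq_neg_one_iff]
        simpa using hmem)]
      have hD : pvD (S ++ [pvSlot P (P[a][b])]) = pvD S := pvD_snoc_mem hmem
      have hstate : (pvQA P S, pvPQA P S, ((pvD S).length : Int))
          = (pvQA P (S ++ [pvSlot P (P[a][b])]), pvPQA P (S ++ [pvSlot P (P[a][b])]),
             ((pvD (S ++ [pvSlot P (P[a][b])])).length : Int)) := by
        rw [pvQA_congr P hD, pvPQA_congr P hD, hD]
      rw [hstate, ih (S ++ [pvSlot P (P[a][b])]) (fun w hw => hws _ (List.mem_cons_of_mem _ hw))]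
      simp
    · rw [if_pos (by
        simp only [beq_iff_eq]
        rw [pvVal_eq_neg_one_iff]
        simpa using hmem)]
      rw [hC _ hbnd.1 hbnd.2]
      rw [pvW1 (pvOcc P (pvSlot P (P[a][b]))) _ (pvQA P S) (fun ij hij => by
        obtain ⟨a', b', ha', hb', hij', _⟩ := pvOcc_valid hij
        refine ⟨a', b', hij', by simpa [pvQA] using ha', ?_⟩
        have : (pvQA P S)[a']'(by simpa [pvQA] using ha')
            = P[a'].map (fun m => pvVal S (pvSlot P m)) := by
          simp [pvQA]
        rw [this]
        simpa using hb')]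
      rw [pvA3 P S (pvSlot P (P[a][b])) hmem]
      rw [pvPQA_set P S P[a][b] hbnd.1 hbnd.2 hmem]
      rw [show ((pvD S).length : Int) + 1
          = ((pvD (S ++ [pvSlot P (P[a][b])])).length : Int) from
        (pvLen_snoc_not_mem hmem).symm]
      rw [ih (S ++ [pvSlot P (P[a][b])]) (fun w hw => hws _ (List.mem_cons_of_mem _ hw))]
      simp

-- B's read of PQ[n] under wrap
lemma pvPQA_read (P : List (List Int)) (S : List Int) (n : Int)
    (h0 : -(pvSize P) ≤ n) (h1 : n < pvSize P) :
    PySem.List.pyGetD (pvPQA P S) n 0 = pvVal S (pvSlot P n) := by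
  have hM : (1 : Int) ≤ pvSize P := by omega
  have hlen : (pvPQA P S).length = (pvSize P).toNat := by simp [pvPQA]
  obtain ⟨hs0, hs1⟩ := pvSlot_bounds P n h0 h1
  rw [pvGetWrap _ _ _ (by rw [hlen]; omega) (by rw [hlen]; omega)]
  have hidx : (if n < 0 then n + ((pvPQA P S).length : Int) else n).toNat
      = (pvSlot P n).toNat := by
    rw [hlen]
    unfold pvSlot
    split_ifs <;> omega
  rw [hidx, List.getD_eq_getElem _ _ (by rw [hlen]; omega)]
  have : (pvPQA P S)[(pvSlot P n).toNat]'(by rw [hlen]; omega)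
      = pvVal S (((pvSlot P n).toNat : Int)) := by
    unfold pvPQA; rw [List.getElem_map, List.getElem_range]
  rw [this]
  congr 1
  omega

-- B's inner loop (one row)
lemma pvBI (P : List (List Int)) :
    ∀ (p S q : List Int), (∀ n ∈ p, -(pvSize P) ≤ n ∧ n < pvSize P) →
    p.foldl sortLabelsAltStep (pvPQA P S, ((pvD S).length : Int), q)
      = (pvPQA P (S ++ p.map (pvSlot P)), ((pvD (S ++ p.map (pvSlot P))).length : Int),
         q ++ p.map (fun n => pvVal (S ++ p.map (pvSlot P)) (pvSlot P n))) := by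
  intro p
  induction p with
  | nil => intro S q hbp; simp
  | cons n p ih =>
    intro S q hbp
    obtain ⟨hn0, hnlt⟩ := hbp n List.mem_cons_self
    simp only [List.foldl_cons, sortLabelsAltStep]
    rw [pvPQA_read P S n hn0 hnlt]
    by_cases hmem : pvSlot P n ∈ S
    · rw [if_neg (by
        simp only [beq_iff_eq]
        rw [pvVal_eq_neg_one_iff]
        simpa using hmem)]
      have hD : pvD (S ++ [pvSlot P n]) = pvD S := pvD_snoc_mem hmem
      have hstate : (pvPQA P S, ((pvD S).length : Int), q ++ [pvVal S (pvSlot P n)])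
          = (pvPQA P (S ++ [pvSlot P n]), ((pvD (S ++ [pvSlot P n])).length : Int),
             q ++ [pvVal S (pvSlot P n)]) := by
        rw [pvPQA_congr P hD, hD]
      rw [hstate, ih (S ++ [pvSlot P n]) (q ++ [pvVal S (pvSlot P n)])
        (fun m hm => hbp m (List.mem_cons_of_mem _ hm))]
      have hS : (S ++ [pvSlot P n]) ++ p.map (pvSlot P) = S ++ (n :: p).map (pvSlot P) := by
        simp
      rw [hS]
      simp only [List.map_cons, List.append_assoc, List.singleton_append]
      rw [show pvVal (S ++ pvSlot P n :: p.map (pvSlot P)) (pvSlot P n)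
          = pvVal S (pvSlot P n) from
        pvVal_mono S (pvSlot P n :: p.map (pvSlot P)) (pvSlot P n) hmem]
    · rw [if_pos (by
        simp only [beq_iff_eq]
        rw [pvVal_eq_neg_one_iff]
        simpa using hmem)]
      rw [pvPQA_set P S n hn0 hnlt hmem]
      rw [pvPQA_read P (S ++ [pvSlot P n]) n hn0 hnlt]
      rw [show ((pvD S).length : Int) + 1 = ((pvD (S ++ [pvSlot P n])).length : Int) from
        (pvLen_snoc_not_mem hmem).symm]
      rw [ih (S ++ [pvSlot P n]) (q ++ [pvVal (S ++ [pvSlot P n]) (pvSlot P n)])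
        (fun m hm => hbp m (List.mem_cons_of_mem _ hm))]
      have hS : (S ++ [pvSlot P n]) ++ p.map (pvSlot P) = S ++ (n :: p).map (pvSlot P) := by
        simp
      rw [hS]
      simp only [List.map_cons, List.append_assoc, List.singleton_append]
      rw [show pvVal (S ++ pvSlot P n :: p.map (pvSlot P)) (pvSlot P n)
          = pvVal (S ++ [pvSlot P n]) (pvSlot P n) from by
        rw [show S ++ pvSlot P n :: p.map (pvSlot P) = (S ++ [pvSlot P n]) ++ p.map (pvSlot P) by simp]
        exact pvVal_mono (S ++ [pvSlot P n]) (p.map (pvSlot P)) (pvSlot P n) (by simp)]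

-- B's outer loop
lemma pvBO (P : List (List Int)) :
    ∀ (rows : List (List Int)) (S : List Int) (Qacc : List (List Int)),
    (∀ p ∈ rows, ∀ n ∈ p, -(pvSize P) ≤ n ∧ n < pvSize P) →
    rows.foldl sortLabelsAltRow (pvPQA P S, ((pvD S).length : Int), Qacc)
      = (pvPQA P (S ++ (rows.flatten).map (pvSlot P)),
         ((pvD (S ++ (rows.flatten).map (pvSlot P))).length : Int),
         Qacc ++ rows.map (fun p => p.map (fun n =>
           pvVal (S ++ (rows.flatten).map (pvSlot P)) (pvSlot P n)))) := by
  intro rows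
  induction rows with
  | nil => intro S Qacc hbr; simp
  | cons p rows ih =>
    intro S Qacc hbr
    simp only [List.foldl_cons, sortLabelsAltRow]
    rw [pvBI P p S [] (hbr p List.mem_cons_self)]
    dsimp only
    rw [show ([] : List Int) ++ p.map (fun n => pvVal (S ++ p.map (pvSlot P)) (pvSlot P n))
        = p.map (fun n => pvVal (S ++ p.map (pvSlot P)) (pvSlot P n)) from List.nil_append _]
    rw [ih (S ++ p.map (pvSlot P))
      (Qacc ++ [p.map (fun n => pvVal (S ++ p.map (pvSlot P)) (pvSlot P n))])
      (fun r hr => hbr r (List.mem_cons_of_mem _ hr))]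
    have hS : (S ++ p.map (pvSlot P)) ++ (rows.flatten).map (pvSlot P)
        = S ++ ((p :: rows).flatten).map (pvSlot P) := by
      simp
    rw [hS]
    simp only [List.flatten_cons, List.map_cons, List.map_append, List.append_assoc,
      List.singleton_append]
    have hrow : p.map (fun n => pvVal (S ++ p.map (pvSlot P)) (pvSlot P n))
        = p.map (fun n => pvVal (S ++ (p.map (pvSlot P) ++ (rows.flatten).map (pvSlot P)))
            (pvSlot P n)) := by
      apply List.map_congr_left
      intro n hn
      rw [show S ++ (p.map (pvSlot P) ++ (rows.flatten).map (pvSlot P))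
          = (S ++ p.map (pvSlot P)) ++ (rows.flatten).map (pvSlot P) by simp]
      exact (pvVal_mono (S ++ p.map (pvSlot P)) ((rows.flatten).map (pvSlot P))
        (pvSlot P n) (by simp; exact Or.inr ⟨n, hn, rfl⟩)).symm
    rw [hrow]

-- the flattened slot sequence
lemma pvFW_slots (P : List (List Int)) :
    (pvFW P).map (fun w => pvSlot P w.2) = (P.flatten).map (pvSlot P) := by
  rw [← pvFW_labels, List.map_map]
  rfl

lemma pvMain (P : List (List Int)) (hPre : Pre_sort_labels P) :
    sort_labels P = sort_labels_alt P := by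
  obtain ⟨hne, hall⟩ := hPre
  have hM : 0 ≤ pvMaxLast P := by
    obtain ⟨p0, P', rfl⟩ : ∃ p0 P', P = p0 :: P' := by
      cases P with
      | nil => exact absurd rfl hne
      | cons p0 P' => exact ⟨p0, P', rfl⟩
    obtain ⟨hp0, hlab⟩ := hall p0 List.mem_cons_self
    obtain ⟨n0, hn0⟩ : ∃ n0, n0 ∈ p0 := by
      cases p0 with
      | nil => exact absurd rfl hp0
      | cons n0 t => exact ⟨n0, List.mem_cons_self⟩
    have := hlab n0 hn0
    omega
  have hb : pvHB P := by
    intro p hp n hn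
    have := (hall p hp).2 n hn
    unfold pvSize
    omega
  have hA : sort_labels P
      = (pvQA P ((P.flatten).map (pvSlot P)), pvPQA P ((P.flatten).map (pvSlot P))) := by
    unfold sort_labels
    dsimp only
    rw [show ((PySem.List.max? (List.map (fun sublist => PySem.List.pyGetD sublist (-1) 0) P)
        fun x => x).getD 0 + 1) = pvSize P from rfl]
    rw [pvN1 P (fun C i j n => PySem.List.pySetD C n (PySem.List.pyGetD C n [] ++ [(i, j)]))
        (List.map (fun _ => ([] : List (Int × Int))) (PySem.List.pyRange 0 (pvSize P) 1))]
    set CF := (pvFW P).foldl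
        (fun st w => PySem.List.pySetD st w.2 (PySem.List.pyGetD st w.2 [] ++ [w.1]))
        (List.map (fun _ => ([] : List (Int × Int))) (PySem.List.pyRange 0 (pvSize P) 1)) with hCF
    rw [pvN1 P (fun s i j n =>
        if (PySem.List.pyGetD (PySem.List.pyGetD s.1 i []) j 0 == -1) = true then
          (List.foldl (fun Q ij =>
              PySem.List.pySetD Q ij.1 (PySem.List.pySetD (PySem.List.pyGetD Q ij.1 []) ij.2 s.2.2))
            s.1 (PySem.List.pyGetD CF n []),
           PySem.List.pySetD s.2.1 n s.2.2, s.2.2 + 1)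
        else s)]
    rw [show List.map (fun sublist => List.map (fun x => (-1 : Int)) sublist) P = pvQA P [] from
      (pvQA_nil P).symm]
    rw [show List.map (fun x => (-1 : Int))
          (List.map (fun x => ([] : List (Int × Int))) (PySem.List.pyRange 0 (pvSize P) 1))
        = pvPQA P [] from by
      rw [List.map_map, pvPQA_nil]
      simp [Function.comp_def, List.map_const', PySem.List.length_pyRange_one]]
    have hstep := pvA2 P CF (fun n h0 h1 => by rw [hCF]; exact pvC1 P hb hM n h0 h1) hb
      (pvFW P) [] (fun w hw => hw)
    rw [show ((pvD []).length : Int) = 0 from rfl] at hstep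
    rw [hstep]
    rw [show (pvFW P).map (fun w => pvSlot P w.2) = (P.flatten).map (pvSlot P) from
      pvFW_slots P]
    simp
  have hB : sort_labels_alt P
      = (pvQA P ((P.flatten).map (pvSlot P)), pvPQA P ((P.flatten).map (pvSlot P))) := by
    unfold sort_labels_alt
    dsimp only
    rw [show ((PySem.List.max? (List.map (fun sublist => PySem.List.pyGetD sublist (-1) 0) P)
        fun x => x).getD 0 + 1) = pvSize P from rfl]
    rw [show List.replicate (pvSize P).toNat (-1 : Int) = pvPQA P [] from (pvPQA_nil P).symm]
    rw [show (0 : Int) = ((pvD []).length : Int) from rfl]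
    rw [pvBO P P [] [] hb]
    simp [pvQA]
  rw [hA, hB]

-- ===== VERDICT (by name: the statement is the Claim_ definition above) =====
theorem sort_labels_spec : Claim_equal_sort_labels := by
  intro P _ hPre
  unfold Spec_sort_labels
  exact pvMain P hPre
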